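-- pv_equiv track=rewrite | github.com/buzzqw/extto | core/cleaner.py | _is_local_path
-- ===== SOURCE A (Python) =====
-- def _is_local_path(path: str) -> bool:
--     """Ritorna True solo se il path è locale (filesystem)."""
--     if not path:
--         return False
--     low = path.lower()
--     for prefix in ('http://', 'https://', 'ftp://', 'smb://', 'nfs://'):
--         if low.startswith(prefix):
--             return False
--     return True
-- ===== SOURCE B (Python) =====
-- _SCHEMES = {'http', 'https', 'ftp', 'smb', 'nfs'}
--
-- def _is_local_path(path: str) -> bool:
--     """Ritorna True solo se il path è locale (filesystem)."""
--     if not path: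
--         return False
--     scheme, sep, _ = path.lower().partition('://')
--     return not sep or scheme not in _SCHEMES
-- ===== Notes on version B (the rewrite author's own statement) =====
-- stated objective: idiomatic
-- what changed: Replaces the five-iteration startswith-prefix loop with a single partition('://') parse followed by one membership test of the scheme in a set.
import Mathlib
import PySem

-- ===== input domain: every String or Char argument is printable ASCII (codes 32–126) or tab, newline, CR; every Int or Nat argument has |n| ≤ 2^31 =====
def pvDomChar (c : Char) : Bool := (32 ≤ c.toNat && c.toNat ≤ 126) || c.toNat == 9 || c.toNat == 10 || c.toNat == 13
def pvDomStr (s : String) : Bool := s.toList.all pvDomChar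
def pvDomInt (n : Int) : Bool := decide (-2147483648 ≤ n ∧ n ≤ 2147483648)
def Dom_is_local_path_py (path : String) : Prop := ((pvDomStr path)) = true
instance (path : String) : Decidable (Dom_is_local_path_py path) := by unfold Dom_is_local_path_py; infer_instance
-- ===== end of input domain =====

-- B replaces A's five-iteration startswith loop by one partition('://') parse plus a scheme-set lookup (idiomatic; same cost).

-- ===== PORT A =====
-- the for-loop over the tuple of prefixes, with its early 'return False'
def pvLoopA (low : String) : List String → Bool
  | [] => true
  | p :: ps => if PySem.Str.startswith low p then false else pvLoopA low ps

def is_local_path_py (path : String) : Bool :=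
  if path = "" then false
  else pvLoopA (PySem.Str.lower path) ["http://", "https://", "ftp://", "smb://", "nfs://"]

-- ===== PORT B =====
-- partition('://') ported by hand via find + slice (exact: partition splits at the FIRST
-- occurrence; sep is empty iff find = -1, and scheme is low[:i] where i = find)
def is_local_path_py_alt (path : String) : Bool :=
  if path = "" then false
  else
    let low := PySem.Str.lower path
    let i := PySem.Str.find low "://"
    if i = -1 then true
    else decide (PySem.Str.slice low (some 0) (some i) ∉ (["http", "https", "ftp", "smb", "nfs"] : List String))

-- ===== PRECONDITION & SPEC =====
def Spec_is_local_path_py (path : String) (out : Bool) : Prop := out = is_local_path_py_alt path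
instance (path : String) (out : Bool) : Decidable (Spec_is_local_path_py path out) := by unfold Spec_is_local_path_py; infer_instance

-- ===== CLAIM (what is proved, stated in full; the proofs are below) =====
def Claim_equal_is_local_path_py : Prop := ∀ (path : String), Dom_is_local_path_py path → Spec_is_local_path_py path (is_local_path_py path)

-- ===== LEMMAS AND PROOFS =====
set_option maxRecDepth 8192

-- A's loop is the negated disjunction of the startswith tests
theorem pvLoopA_eq_any (low : String) (ps : List String) :
    pvLoopA low ps = !(ps.any (fun p => PySem.Str.startswith low p)) := by
  induction ps with
  | nil => rfl
  | cons p ps ih => simp [pvLoopA, ih, Bool.not_or]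

-- when '://' does not occur in l, no scheme-prefix (each of which contains '://') is a prefix
theorem pv_no_sep_no_prefix (l p : List Char) (hsep : ([':', '/', '/'] : List Char) <:+: p)
    (hno : ¬ ([':', '/', '/'] : List Char) <:+: l) :
    PySem.Chars.startswith l p = false := by
  rw [Bool.eq_false_iff, Ne, PySem.Chars.startswith_iff]
  intro hp
  exact hno (hsep.trans hp.isInfix)

-- the key partition lemma: for a scheme without ':' and when '://' occurs in l,
-- (scheme ++ "://") is a prefix of l  iff  l up to the FIRST '://' equals scheme
theorem pv_key (l scheme : List Char) (hs : ∀ c ∈ scheme, c ≠ ':')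
    (hf : 0 ≤ PySem.Chars.find l [':', '/', '/']) :
    (scheme ++ [':', '/', '/'] <+: l) ↔
      l.take (PySem.Chars.find l [':', '/', '/']).toNat = scheme := by
  obtain ⟨hpre, hmin⟩ := PySem.Chars.find_spec hf
  obtain ⟨n, hn⟩ : ∃ n, (PySem.Chars.find l [':', '/', '/']).toNat = n := ⟨_, rfl⟩
  rw [hn] at hpre ⊢
  have hmin' : ∀ i < n, ¬ ([':', '/', '/'] : List Char) <+: List.drop i l := by
    intro i hi
    exact hmin i (hn ▸ hi)
  clear hmin hn hf
  constructor
  · rintro ⟨rest, hrest⟩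
    have hl : l = scheme ++ ([':', '/', '/'] ++ rest) := by rw [← hrest]; simp
    have hle : n ≤ scheme.length := by
      by_contra h
      push_neg at h
      refine hmin' scheme.length h ⟨rest, ?_⟩
      rw [hl]
      simp
    have hge : scheme.length ≤ n := by
      by_contra h
      push_neg at h
      obtain ⟨t, ht⟩ := hpre
      have h0 : (List.drop n l)[0]? = some ':' := by rw [← ht]; rfl
      have h0' : l[n]? = some ':' := by simpa using h0
      rw [hl, List.getElem?_append_left (by simpa using h)] at h0'
      exact hs ':' (List.mem_of_getElem? h0') rfl
    have : n = scheme.length := le_antisymm hle hge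
    rw [this, hl, List.take_left]
  · intro h
    obtain ⟨t, ht⟩ := hpre
    refine ⟨t, ?_⟩
    rw [← h, List.append_assoc, ht]
    exact List.take_append_drop n l

-- the whole comparison, stated over the shared lowered character list
theorem pv_main (l : List Char) :
    (!(["http://", "https://", "ftp://", "smb://", "nfs://"] : List String).any
        (fun p => PySem.Chars.startswith l p.toList)) =
      (if PySem.Chars.find l [':', '/', '/'] = -1 then true
       else decide (l.take (PySem.Chars.find l [':', '/', '/']).toNat ∉
          ([['h','t','t','p'], ['h','t','t','p','s'], ['f','t','p'], ['s','m','b'], ['n','f','s']] :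
            List (List Char)))) := by
  by_cases hf : PySem.Chars.find l [':', '/', '/'] = -1
  · rw [if_pos hf]
    have hno : ¬ ([':', '/', '/'] : List Char) <:+: l :=
      (PySem.Chars.find_eq_neg_one_iff l _).mp hf
    have s1 := pv_no_sep_no_prefix l ['h','t','t','p',':','/','/'] ⟨['h','t','t','p'], [], by simp⟩ hno
    have s2 := pv_no_sep_no_prefix l ['h','t','t','p','s',':','/','/'] ⟨['h','t','t','p','s'], [], by simp⟩ hno
    have s3 := pv_no_sep_no_prefix l ['f','t','p',':','/','/'] ⟨['f','t','p'], [], by simp⟩ hno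
    have s4 := pv_no_sep_no_prefix l ['s','m','b',':','/','/'] ⟨['s','m','b'], [], by simp⟩ hno
    have s5 := pv_no_sep_no_prefix l ['n','f','s',':','/','/'] ⟨['n','f','s'], [], by simp⟩ hno
    simp [s1, s2, s3, s4, s5]
  · rw [if_neg hf]
    have hf' : 0 ≤ PySem.Chars.find l [':', '/', '/'] := by
      have := PySem.Chars.neg_one_le_find l [':', '/', '/']
      omega
    have k1 := pv_key l ['h','t','t','p'] (by simp) hf'
    have k2 := pv_key l ['h','t','t','p','s'] (by simp) hf'
    have k3 := pv_key l ['f','t','p'] (by simp) hf'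
    have k4 := pv_key l ['s','m','b'] (by simp) hf'
    have k5 := pv_key l ['n','f','s'] (by simp) hf'
    simp only [List.cons_append, List.nil_append] at k1 k2 k3 k4 k5
    have hb : ∀ (b c : Bool), (b = true ↔ c = true) → b = c := by decide
    apply hb
    simp only [Bool.not_eq_eq_eq_not, Bool.not_true,
      List.any_eq_false, decide_eq_true_eq, List.mem_cons, List.not_mem_nil]
    simp [PySem.Chars.startswith_iff, k1, k2, k3, k4, k5]

-- ===== VERDICT (by name: the statement is the Claim_ definition above) =====
theorem is_local_path_py_spec : Claim_equal_is_local_path_py := by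
  intro path _
  unfold Spec_is_local_path_py is_local_path_py is_local_path_py_alt
  by_cases hp : path = ""
  · simp [hp]
  · have hsep : ("://" : String).toList = [':', '/', '/'] := by simp
    rw [if_neg hp, if_neg hp, pvLoopA_eq_any]
    simp only [PySem.Str.startswith_eq, PySem.Str.find_eq, hsep]
    rw [pv_main]
    by_cases hf : PySem.Chars.find (PySem.Str.lower path).toList [':', '/', '/'] = -1
    · rw [if_pos hf, if_pos hf]
    · rw [if_neg hf, if_neg hf]
      have hf' : 0 ≤ PySem.Chars.find (PySem.Str.lower path).toList [':', '/', '/'] := by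
        have := PySem.Chars.neg_one_le_find (PySem.Str.lower path).toList [':', '/', '/']
        omega
      have hslice : (PySem.Str.slice (PySem.Str.lower path) (some 0)
          (some (PySem.Chars.find (PySem.Str.lower path).toList [':', '/', '/']))).toList =
          (PySem.Str.lower path).toList.take
            (PySem.Chars.find (PySem.Str.lower path).toList [':', '/', '/']).toNat := by
        simp
        exact PySem.List.slice_to _ (by simpa using hf')
      rw [decide_eq_decide]
      apply not_congr
      simp only [List.mem_cons, List.not_mem_nil, or_false, ← String.toList_inj, hslice]
      simp
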